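-- pv_equiv track=rewrite | github.com/DrRago/SZUT-python | 2015_04_03 - Sexteten.py | sexToDez
-- ===== SOURCE A (Python) =====
-- def sexToDez(sexList):
--     # Funktion zum Umrechnen von einer Sextetenzahl in eine Dezimalzahl als Integer
--     sexteten = {"<": 0, ">": 1, "*": 2, "+": 3, "(": 4, ")": 5}
--     hex = ""
--     for i in sexList:
--         hex += str(sexteten[i])
--     list = [i for i in str(hex)]
--     list.reverse()
--     count = 0
--     res = 0
--     for i in list:
--         res += (6 ** count) * int(i)
--         count += 1
--     return res
-- ===== SOURCE B (Python) =====
-- def sexToDez(sexList):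
--     # Recursive place-value decomposition: first symbol contributes
--     # its value times 6**(remaining length), plus the value of the rest.
--     sexteten = {"<": 0, ">": 1, "*": 2, "+": 3, "(": 4, ")": 5}
--     if not sexList:
--         return 0
--     return sexteten[sexList[0]] * 6 ** (len(sexList) - 1) + sexToDez(sexList[1:])
-- ===== Notes on version B (the rewrite author's own statement) =====
-- stated objective: simpler
-- what changed: Replaced A's three-stage pipeline (build a digit string, explode and reverse it, then sum digit*6**count low-to-high) by a direct recursive place-value decomposition: the head symbol's value times 6**(len-1) plus the recursive value of the tail, with no intermediate string, list or reversal.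
import Mathlib
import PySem

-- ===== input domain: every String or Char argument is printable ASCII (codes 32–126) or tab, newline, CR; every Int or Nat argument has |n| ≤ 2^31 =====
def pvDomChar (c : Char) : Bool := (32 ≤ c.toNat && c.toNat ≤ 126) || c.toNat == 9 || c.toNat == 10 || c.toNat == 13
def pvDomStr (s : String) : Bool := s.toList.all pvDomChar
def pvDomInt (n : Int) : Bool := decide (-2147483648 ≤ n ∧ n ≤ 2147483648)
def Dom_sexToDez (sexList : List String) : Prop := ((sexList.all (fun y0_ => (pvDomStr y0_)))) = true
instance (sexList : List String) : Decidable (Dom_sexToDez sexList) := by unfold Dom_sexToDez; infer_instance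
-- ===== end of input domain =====

-- B replaces A's digit-string build + reversal + power summation by a recursive place-value decomposition (simpler decomposition).


-- ===== PORT A =====
-- the dict literal 'sexteten' both Pythons share
def sexTable : PySem.Dict String Int :=
  PySem.Dict.ofList [("<", 0), (">", 1), ("*", 2), ("+", 3), ("(", 4), (")", 5)]

-- sexteten[i] (KeyError, i.e. none, is excluded by Pre_; 0 is never returned as a default inside Pre_)
def sexLook (i : String) : Int := PySem.Dict.getD sexTable i 0

def sexToDez (sexList : List String) : Int :=
  let hex : String := sexList.foldl (fun h i => h ++ PySem.Int.toStr (sexLook i)) ""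
  let lst : List Char := hex.toList
  let lst := lst.reverse
  let r : Nat × Int :=
    lst.foldl (fun cr i => (cr.1 + 1, cr.2 + (6 : Int) ^ cr.1 * (PySem.Int.ofChars? [i]).getD 0)) (0, 0)
  r.2

-- ===== PORT B =====
-- recursive place-value decomposition: head * 6^(len tail) + value of tail
def sexToDez_alt : List String → Int
  | [] => 0
  | s :: rest => sexLook s * (6 : Int) ^ rest.length + sexToDez_alt rest

-- ===== PRECONDITION & SPEC =====
-- Pre_ excludes exactly the inputs with a symbol outside the sexteten dict, on which Python A (and B) raise KeyError.
def Pre_sexToDez (sexList : List String) : Prop :=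
  ∀ s ∈ sexList, s = "<" ∨ s = ">" ∨ s = "*" ∨ s = "+" ∨ s = "(" ∨ s = ")"
instance (sexList : List String) : Decidable (Pre_sexToDez sexList) := by unfold Pre_sexToDez; infer_instance
def pvWitness_sexToDez : List String := ["(", "<", ")", "*"]

def Spec_sexToDez (sexList : List String) (out : Int) : Prop := out = sexToDez_alt sexList
instance (sexList : List String) (out : Int) : Decidable (Spec_sexToDez sexList out) := by unfold Spec_sexToDez; infer_instance

-- ===== CLAIM (what is proved, stated in full; the proofs are below) =====
def Claim_equal_sexToDez : Prop := ∀ (sexList : List String), Dom_sexToDez sexList → Pre_sexToDez sexList → Spec_sexToDez sexList (sexToDez sexList)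

-- ===== LEMMAS AND PROOFS =====

-- every value sexLook produces is one of the six digits
theorem sexLook_cases (i : String) :
    sexLook i = 0 ∨ sexLook i = 1 ∨ sexLook i = 2 ∨ sexLook i = 3 ∨ sexLook i = 4 ∨ sexLook i = 5 := by
  by_cases h1 : "<" = i; · subst h1; decide
  by_cases h2 : ">" = i; · subst h2; decide
  by_cases h3 : "*" = i; · subst h3; decide
  by_cases h4 : "+" = i; · subst h4; decide
  by_cases h5 : "(" = i; · subst h5; decide
  by_cases h6 : ")" = i; · subst h6; decide
  left
  have e1 : ("<" == i) = false := by simp [h1]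
  have e2 : (">" == i) = false := by simp [h2]
  have e3 : ("*" == i) = false := by simp [h3]
  have e4 : ("+" == i) = false := by simp [h4]
  have e5 : ("(" == i) = false := by simp [h5]
  have e6 : (")" == i) = false := by simp [h6]
  unfold sexLook sexTable
  simp [e1, e2, e3, e4, e5, e6, PySem.Dict.getD, PySem.Dict.get?, PySem.Dict.ofList, PySem.Dict.empty, PySem.Dict.update,
    PySem.Dict.insert, List.find?]

-- str(sexteten[i]) is a single digit char that int() parses back to sexteten[i]
theorem sexLook_char (i : String) :
    ∃ c : Char, (PySem.Int.toStr (sexLook i)).toList = [c] ∧ (PySem.Int.ofChars? [c]).getD 0 = sexLook i := by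
  rcases sexLook_cases i with h | h | h | h | h | h <;> rw [h]
  · exact ⟨'0', by decide, by decide⟩
  · exact ⟨'1', by decide, by decide⟩
  · exact ⟨'2', by decide, by decide⟩
  · exact ⟨'3', by decide, by decide⟩
  · exact ⟨'4', by decide, by decide⟩
  · exact ⟨'5', by decide, by decide⟩

-- the value of A's second loop: res = Σ digit * 6^position, low-to-high over cs
def sexW : List Char → Int
  | [] => 0
  | c :: cs => (PySem.Int.ofChars? [c]).getD 0 + 6 * sexW cs

theorem sexLoopA (cs : List Char) (k : Nat) (r : Int) :
    (cs.foldl (fun cr i => (cr.1 + 1, cr.2 + (6 : Int) ^ cr.1 * (PySem.Int.ofChars? [i]).getD 0)) (k, r)).2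
      = r + (6 : Int) ^ k * sexW cs := by
  induction cs generalizing k r with
  | nil => simp [sexW]
  | cons c cs ih => simp [List.foldl_cons, ih, sexW, pow_succ]; ring

-- appending one symbol multiplies B's value by 6 and adds the new digit
theorem sexAlt_append (l : List String) (x : String) :
    sexToDez_alt (l ++ [x]) = 6 * sexToDez_alt l + sexLook x := by
  induction l with
  | nil => simp [sexToDez_alt]
  | cons s l ih =>
    simp only [List.cons_append, sexToDez_alt, ih, List.length_append, List.length_cons,
      List.length_nil, pow_succ]
    ring

theorem sexToDez_eq_alt (l : List String) : sexToDez l = sexToDez_alt l := by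
  induction l using List.reverseRecOn with
  | nil => rfl
  | append_singleton l x ih =>
    obtain ⟨c, hc, hv⟩ := sexLook_char x
    unfold sexToDez at *
    simp only [List.foldl_append, List.foldl_cons, List.foldl_nil] at *
    rw [String.toList_append, hc, List.reverse_append, sexAlt_append]
    simp only [List.reverse_cons, List.reverse_nil, List.nil_append, List.singleton_append,
      List.foldl_cons]
    rw [sexLoopA] at *
    simp only [pow_zero, pow_succ, one_mul, zero_add] at ih ⊢
    linarith [ih, hv]

-- ===== VERDICT (by name: the statement is the Claim_ definition above) =====
theorem sexToDez_spec : Claim_equal_sexToDez := by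
  intro l _ _
  unfold Spec_sexToDez
  exact sexToDez_eq_alt l
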